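-- pv_equiv track=rewrite | github.com/kangwongu/TIL | 프로그래머스/lv0/120837. 개미 군단/개미 군단.py | solution
-- ===== SOURCE A (Python) =====
-- def solution(hp):
--     answer = 0
--     ants = [5,3,1]
--
--     for ant in ants:
--         answer += hp//ant
--         hp %= ant
--
--         if hp==0:
--             break
--
--     return answer
-- ===== SOURCE B (Python) =====
-- def solution(hp):
--     # ant count is periodic with period 15 (lcm of 5 and 3) up to a linear term:
--     # each full block of 15 hp costs exactly 3 ants; the remainder is a table lookup.
--     table = [0, 1, 2, 1, 2, 1, 2, 3, 2, 3, 2, 3, 4, 3, 4]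
--     q = hp // 15
--     r = hp % 15
--     return 3 * q + table[r]
-- ===== Notes on version B (the rewrite author's own statement) =====
-- stated objective: alternative
-- what changed: Replaces the greedy division loop over denominations with a period-15 lookup table plus a linear term: 3*(hp//15) + table[hp%15], using that the ant count is 15-periodic up to 3 ants per block of 15 hp.
import Mathlib
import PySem

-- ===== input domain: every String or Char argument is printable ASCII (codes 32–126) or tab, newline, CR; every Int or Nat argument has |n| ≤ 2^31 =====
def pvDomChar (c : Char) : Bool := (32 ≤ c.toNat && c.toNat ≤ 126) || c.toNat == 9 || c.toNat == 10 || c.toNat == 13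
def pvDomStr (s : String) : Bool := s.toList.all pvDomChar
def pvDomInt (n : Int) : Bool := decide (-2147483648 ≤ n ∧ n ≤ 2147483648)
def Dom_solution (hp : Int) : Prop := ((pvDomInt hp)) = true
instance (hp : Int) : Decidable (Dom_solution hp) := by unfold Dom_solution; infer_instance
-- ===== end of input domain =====

-- B replaces A's greedy loop with a period-15 lookup table plus a linear term (objective: alternative).

-- ===== PORT A =====
-- for ant in ants: answer += hp//ant; hp %= ant; if hp==0: break
def solutionLoop : List Int → Int → Int → Int
  | [], answer, _ => answer
  | ant :: rest, answer, hp =>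
      let answer := answer + PySem.Int.floordiv hp ant
      let hp := PySem.Int.mod hp ant
      if hp = 0 then answer else solutionLoop rest answer hp

def solution (hp : Int) : Int := solutionLoop [5, 3, 1] 0 hp

-- ===== PORT B =====
def pvTable : List Int := [0, 1, 2, 1, 2, 1, 2, 3, 2, 3, 2, 3, 4, 3, 4]

-- table[r] with r = hp % 15 ∈ [0,15): always in range, so the getD default is never taken
def solution_alt (hp : Int) : Int :=
  let q := PySem.Int.floordiv hp 15
  let r := PySem.Int.mod hp 15
  3 * q + (PySem.List.pyGet? pvTable r).getD 0

-- ===== PRECONDITION & SPEC =====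
def Spec_solution (hp : Int) (out : Int) : Prop := out = solution_alt hp
instance (hp : Int) (out : Int) : Decidable (Spec_solution hp out) := by unfold Spec_solution; infer_instance

-- ===== CLAIM (what is proved, stated in full; the proofs are below) =====
def Claim_equal_solution : Prop := ∀ (hp : Int), Dom_solution hp → Spec_solution hp (solution hp)

-- ===== LEMMAS AND PROOFS =====
theorem pv_fd (a b : Int) (h : 0 < b) : PySem.Int.floordiv a b = a / b :=
  PySem.Int.floordiv_eq_ediv_of_pos h

theorem pv_md (a b : Int) (h : 0 < b) : PySem.Int.mod a b = a % b :=
  PySem.Int.mod_eq_emod_of_pos h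

theorem pv_table_val (r : Int) (h0 : 0 ≤ r) (h1 : r < 15) :
    (PySem.List.pyGet? pvTable r).getD 0 = r / 5 + r % 5 / 3 + r % 5 % 3 := by
  interval_cases r <;> decide

theorem solution_closed (hp : Int) : solution hp = solution_alt hp := by
  simp only [solution, solution_alt, solutionLoop,
    pv_table_val (hp % 15) (Int.emod_nonneg _ (by norm_num)) (Int.emod_lt_of_pos _ (by norm_num)),
    pv_fd _ 5 (by norm_num), pv_md _ 5 (by norm_num),
    pv_fd _ 3 (by norm_num), pv_md _ 3 (by norm_num),
    pv_fd _ 1 (by norm_num), pv_md _ 1 (by norm_num),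
    pv_fd _ 15 (by norm_num), pv_md _ 15 (by norm_num)]
  split_ifs <;> omega

-- ===== VERDICT (by name: the statement is the Claim_ definition above) =====
theorem solution_spec : Claim_equal_solution := by
  intro hp _
  exact solution_closed hp
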